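-- pv_equiv track=rewrite | github.com/kakack/crush-in-leetcode | code/Python/1104-Path In Zigzag Labelled Binary Tree.py | pathInZigZagTree
-- ===== SOURCE A (Python) =====
-- def pathInZigZagTree(label):
--     """
--     :type label: int
--     :rtype: List[int]
--     """
--     ans = [1]
--
--     def dfs(label, k):
--         if k == 1:
--             return
--         tmp = label - (1 << (k - 1))
--         tmp >>= 1
--         tmp = (1 << (k - 1)) - tmp - 1
--         dfs(tmp, k - 1)
--         ans.append(label)
--
--     k, tmp = 0, label
--     while tmp:
--         tmp >>= 1
--         k += 1
--     dfs(label, k)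
--     return ans
-- ===== SOURCE B (Python) =====
-- def pathInZigZagTree(label):
--     """
--     :type label: int
--     :rtype: List[int]
--     """
--     k = label.bit_length()
--     node = label
--     path = []
--     while k > 1:
--         path.append(node)
--         node = ((1 << (k - 1)) + (1 << k) - 1 - node) // 2
--         k -= 1
--     path.append(1)
--     path.reverse()
--     return path
-- ===== Notes on version B (the rewrite author's own statement) =====
-- stated objective: simpler
-- what changed: Replaces A's post-order recursion that appends labels into a closure-captured list while unwinding with an iterative bottom-up loop using int.bit_length() and a single merged parent formula, collecting labels leaf-to-root and reversing once.
-- outside the precondition, e.g. on pathInZigZagTree(0): A raises ValueError, B returns [1]; on pathInZigZagTree(-5): A does not finish within the time limit, B returns [1, 8, -5]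
import Mathlib
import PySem

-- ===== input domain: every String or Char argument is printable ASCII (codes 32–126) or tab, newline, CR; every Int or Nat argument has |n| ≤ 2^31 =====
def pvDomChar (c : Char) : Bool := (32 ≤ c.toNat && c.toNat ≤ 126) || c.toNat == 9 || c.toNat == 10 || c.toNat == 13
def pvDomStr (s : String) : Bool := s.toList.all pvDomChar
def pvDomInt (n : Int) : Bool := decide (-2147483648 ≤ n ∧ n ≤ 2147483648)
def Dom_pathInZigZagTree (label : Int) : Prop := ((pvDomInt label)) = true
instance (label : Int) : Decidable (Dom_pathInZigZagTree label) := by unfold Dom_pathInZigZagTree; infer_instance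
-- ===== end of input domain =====

-- B replaces A's post-order recursion (building the path while unwinding the stack) by an
-- iterative bottom-up loop with an accumulator list that is reversed at the end; objective: simpler.

-- ===== PORT A =====
-- 'k, tmp = 0, label; while tmp: tmp >>= 1; k += 1' — Python never terminates for tmp < 0
-- (outside Pre_); the 0 < tmp guard only totalizes the function there, tmp = 0 stops exactly as in Python.
def pvBitLoopA (tmp k : Int) : Int :=
  if _h : 0 < tmp then pvBitLoopA (tmp >>> (1 : Nat)) (k + 1) else k
termination_by tmp.toNat
decreasing_by
  have h2 : tmp >>> (1 : Nat) = tmp / 2 := by rw [Int.shiftRight_eq_div_pow]; norm_num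
  simp only [h2]; omega

-- dfs(label, k): 'if k == 1: return' then the three tmp steps and the recursive call before
-- the append. For k ≤ 0 Python raises ValueError (negative shift count), outside Pre_;
-- the single 1 < k guard returns [] for k = 1 (as Python) and totalizes the k ≤ 0 case.
def pvDfsA (label k : Int) : List Int :=
  if _h : 1 < k then
    pvDfsA (((1 : Int) <<< (k - 1).toNat) - ((label - ((1 : Int) <<< (k - 1).toNat)) >>> (1 : Nat)) - 1) (k - 1)
      ++ [label]
  else []
termination_by k.toNat
decreasing_by omega

-- ans = [1]; dfs(label, k); return ans
def pathInZigZagTree (label : Int) : List Int :=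
  1 :: pvDfsA label (pvBitLoopA label 0)

-- ===== PORT B =====
-- 'while k > 1: path.append(node); node = ((1 << (k-1)) + (1 << k) - 1 - node) // 2; k -= 1'
def pvLoopB (node k : Int) (path : List Int) : List Int :=
  if _h : 1 < k then
    pvLoopB (PySem.Int.floordiv (((1 : Int) <<< (k - 1).toNat) + ((1 : Int) <<< k.toNat) - 1 - node) 2) (k - 1)
      (path ++ [node])
  else path
termination_by k.toNat
decreasing_by omega

-- k = label.bit_length(); …loop…; path.append(1); path.reverse(); return path
def pathInZigZagTree_alt (label : Int) : List Int :=
  (pvLoopB label (PySem.Int.bitLength label : Int) [] ++ [1]).reverse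

-- ===== PRECONDITION & SPEC =====
-- Pre_ excludes label ≤ 0: Python A raises ValueError (negative shift count) on label = 0
-- and never terminates on label < 0; tree labels are positive by the problem statement.
def Pre_pathInZigZagTree (label : Int) : Prop := 1 ≤ label
instance (label : Int) : Decidable (Pre_pathInZigZagTree label) := by
  unfold Pre_pathInZigZagTree; infer_instance
def pvWitness_pathInZigZagTree : Int := 14

def Spec_pathInZigZagTree (label : Int) (out : List Int) : Prop := out = pathInZigZagTree_alt label
instance (label : Int) (out : List Int) : Decidable (Spec_pathInZigZagTree label out) := by
  unfold Spec_pathInZigZagTree; infer_instance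

-- ===== CLAIM (what is proved, stated in full; the proofs are below) =====
def Claim_equal_pathInZigZagTree : Prop := ∀ (label : Int), Dom_pathInZigZagTree label →
  Pre_pathInZigZagTree label → Spec_pathInZigZagTree label (pathInZigZagTree label)

-- ===== LEMMAS AND PROOFS =====

-- A's bit-length loop computes Python's label.bit_length() (for nonnegative input).
theorem pvBitLoopA_eq : ∀ (n : Nat) (tmp k : Int), tmp.toNat = n → 0 ≤ tmp →
    pvBitLoopA tmp k = k + (PySem.Int.bitLength tmp : Int) := by
  intro n
  induction n using Nat.strong_induction_on with
  | _ n ih =>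
    intro tmp k hn h0
    rw [pvBitLoopA]
    by_cases hpos : 0 < tmp
    · have hsh : tmp >>> (1 : Nat) = tmp / 2 := by rw [Int.shiftRight_eq_div_pow]; norm_num
      have hfd : PySem.Int.floordiv tmp 2 = tmp / 2 :=
        PySem.Int.floordiv_eq_ediv_of_pos (by norm_num)
      have hlt : (tmp >>> (1 : Nat)).toNat < n := by simp only [hsh]; omega
      have hrec := ih _ hlt (tmp >>> (1 : Nat)) (k + 1) rfl (by simp only [hsh]; omega)
      rw [dif_pos hpos, hrec, PySem.Int.bitLength_of_pos hpos, hfd, ← hsh]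
      push_cast; ring
    · have : tmp = 0 := by omega
      subst this
      simp [PySem.Int.bitLength_zero]

-- the accumulator of B's loop is only appended to
theorem pvLoopB_acc : ∀ (n : Nat) (node k : Int) (path : List Int), k.toNat = n →
    pvLoopB node k path = path ++ pvLoopB node k [] := by
  intro n
  induction n using Nat.strong_induction_on with
  | _ n ih =>
    intro node k path hn
    by_cases hk : 1 < k
    · conv_lhs => rw [pvLoopB]
      conv_rhs => rw [pvLoopB]
      simp only [dif_pos hk]
      rw [ih (k - 1).toNat (by omega) _ _ (path ++ [node]) rfl,
          ih (k - 1).toNat (by omega) _ _ ([] ++ [node]) rfl]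
      simp
    · conv_lhs => rw [pvLoopB]
      conv_rhs => rw [pvLoopB]
      simp [dif_neg hk]

-- B's loop, reversed, is A's recursion: the two parent formulas agree at every level.
theorem pvLoopB_rev_eq_dfsA : ∀ (n : Nat) (node k : Int), k.toNat = n →
    (pvLoopB node k []).reverse = pvDfsA node k := by
  intro n
  induction n using Nat.strong_induction_on with
  | _ n ih =>
    intro node k hn
    by_cases hk : 1 < k
    · rw [pvLoopB, pvDfsA, dif_pos hk, dif_pos hk]
      rw [pvLoopB_acc (k - 1).toNat _ _ _ rfl]
      have hparent :
          PySem.Int.floordiv (((1 : Int) <<< (k - 1).toNat) + ((1 : Int) <<< k.toNat) - 1 - node) 2 =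
          ((1 : Int) <<< (k - 1).toNat) - ((node - ((1 : Int) <<< (k - 1).toNat)) >>> (1 : Nat)) - 1 := by
        have hp : (1 : Int) <<< (k - 1).toNat = 2 ^ (k - 1).toNat := by simp [Int.shiftLeft_eq]
        have hq : (1 : Int) <<< k.toNat = 2 ^ k.toNat := by simp [Int.shiftLeft_eq]
        have hk2 : k.toNat = (k - 1).toNat + 1 := by omega
        have hsh : (node - ((1 : Int) <<< (k - 1).toNat)) >>> (1 : Nat)
            = (node - ((1 : Int) <<< (k - 1).toNat)) / 2 := by
          rw [Int.shiftRight_eq_div_pow]; norm_num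
        have hfd : PySem.Int.floordiv (((1 : Int) <<< (k - 1).toNat) + ((1 : Int) <<< k.toNat) - 1 - node) 2 =
            (((1 : Int) <<< (k - 1).toNat) + ((1 : Int) <<< k.toNat) - 1 - node) / 2 :=
          PySem.Int.floordiv_eq_ediv_of_pos (by norm_num)
        rw [hfd, hsh, hp, hq, hk2, pow_succ]
        generalize (2 : Int) ^ (k - 1).toNat = p
        omega
      rw [hparent, List.reverse_append, ih (k - 1).toNat (by omega) _ _ rfl]
      simp
    · rw [pvLoopB, pvDfsA, dif_neg hk, dif_neg hk]; simp

-- ===== VERDICT (by name: the statement is the Claim_ definition above) =====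
theorem pathInZigZagTree_spec : Claim_equal_pathInZigZagTree := by
  intro label _hdom hpre
  unfold Spec_pathInZigZagTree pathInZigZagTree pathInZigZagTree_alt
  rw [pvBitLoopA_eq label.toNat label 0 rfl (by exact le_trans (by norm_num) hpre)]
  rw [List.reverse_append, ← pvLoopB_rev_eq_dfsA (0 + (PySem.Int.bitLength label : Int)).toNat
    label _ rfl]
  simp
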